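-- pv_equiv track=rewrite | github.com/fritte115/bidded-mvp | src/bidded/company/website_import.py | _key_page_score
-- ===== SOURCE A (Python) =====
-- def _key_page_score(path: str, label: str) -> int:
--     haystack = f"{path} {label}".lower()
--     scores = {
--         "about": 100,
--         "service": 90,
--         "solution": 88,
--         "case": 82,
--         "customer": 80,
--         "reference": 80,
--         "contact": 72,
--         "security": 70,
--         "sustainability": 68,
--         "esg": 64,
--     }
--     return max(
--         (score for keyword, score in scores.items() if keyword in haystack),
--         default=0,
--     )
-- ===== SOURCE B (Python) =====
-- _ORDERED = (
--     ("about", 100),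
--     ("service", 90),
--     ("solution", 88),
--     ("case", 82),
--     ("customer", 80),
--     ("reference", 80),
--     ("contact", 72),
--     ("security", 70),
--     ("sustainability", 68),
--     ("esg", 64),
-- )
--
--
-- def _key_page_score(path: str, label: str) -> int:
--     haystack = f"{path} {label}".lower()
--     for keyword, score in _ORDERED:
--         if keyword in haystack:
--             return score
--     return 0
-- ===== Notes on version B (the rewrite author's own statement) =====
-- stated objective: simpler
-- what changed: Replaces the build-all-matches-and-take-max computation with an early-return scan over a statically score-descending keyword table: the first keyword found in the haystack decides the score, so no max is computed.
import Mathlib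
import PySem

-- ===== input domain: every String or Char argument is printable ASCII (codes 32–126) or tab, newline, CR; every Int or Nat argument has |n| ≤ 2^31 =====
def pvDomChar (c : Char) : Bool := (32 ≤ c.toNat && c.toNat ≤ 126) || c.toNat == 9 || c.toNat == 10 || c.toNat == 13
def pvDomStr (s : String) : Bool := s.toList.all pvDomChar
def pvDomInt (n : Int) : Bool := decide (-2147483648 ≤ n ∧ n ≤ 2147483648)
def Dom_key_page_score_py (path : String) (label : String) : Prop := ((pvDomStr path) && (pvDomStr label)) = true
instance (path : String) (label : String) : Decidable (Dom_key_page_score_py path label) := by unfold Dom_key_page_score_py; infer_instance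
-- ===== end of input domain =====

-- B replaces A's collect-all-matches-then-max with an early-return scan over a score-descending keyword table (simpler decomposition, same result).


-- ===== PORT A =====
def key_page_score_py (path : String) (label : String) : Int :=
  let haystack := PySem.Str.lower (path ++ " " ++ label)
  let scores : PySem.Dict String Int := PySem.Dict.ofList
    [("about", 100), ("service", 90), ("solution", 88), ("case", 82), ("customer", 80),
     ("reference", 80), ("contact", 72), ("security", 70), ("sustainability", 68), ("esg", 64)]
  PySem.List.maxD ((scores.items.filter (fun kv => PySem.Str.isIn kv.1 haystack)).map (fun kv => kv.2))
    (fun x => x) 0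

-- ===== PORT B =====
-- the module-level ordered table of Source B (scores already descending)
def pvOrdered : List (String × Int) :=
  [("about", 100), ("service", 90), ("solution", 88), ("case", 82), ("customer", 80),
   ("reference", 80), ("contact", 72), ("security", 70), ("sustainability", 68), ("esg", 64)]

-- the for-loop of Source B: return the first matching keyword's score, else 0
def pvScan (hay : String) : List (String × Int) → Int
  | [] => 0
  | (k, s) :: rest => if PySem.Str.isIn k hay then s else pvScan hay rest

def key_page_score_py_alt (path : String) (label : String) : Int :=
  let haystack := PySem.Str.lower (path ++ " " ++ label)
  pvScan haystack pvOrdered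

-- ===== PRECONDITION & SPEC =====
def Spec_key_page_score_py (path : String) (label : String) (out : Int) : Prop := out = key_page_score_py_alt path label
instance (path : String) (label : String) (out : Int) : Decidable (Spec_key_page_score_py path label out) := by unfold Spec_key_page_score_py; infer_instance

-- ===== CLAIM (what is proved, stated in full; the proofs are below) =====
def Claim_equal_key_page_score_py : Prop := ∀ (path : String) (label : String), Dom_key_page_score_py path label → Spec_key_page_score_py path label (key_page_score_py path label)

-- ===== LEMMAS AND PROOFS =====

-- the literal dict's items are the literal pair list (distinct keys)
lemma items_ofList_scores :
    (PySem.Dict.ofList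
      [("about", (100 : Int)), ("service", 90), ("solution", 88), ("case", 82), ("customer", 80),
       ("reference", 80), ("contact", 72), ("security", 70), ("sustainability", 68), ("esg", 64)]).items
    = pvOrdered := by decide

-- on a score-descending, nonnegative table, max-of-matches-with-default-0 equals first-match scan
lemma maxD_filter_eq_pvScan (hay : String) :
    ∀ l : List (String × Int), l.Pairwise (fun a b => b.2 ≤ a.2) → (∀ p ∈ l, 0 ≤ p.2) →
      PySem.List.maxD ((l.filter (fun kv => PySem.Str.isIn kv.1 hay)).map (fun kv => kv.2)) (fun x => x) 0
        = pvScan hay l := by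
  intro l
  induction l with
  | nil => intro _ _; rfl
  | cons hd tl ih =>
    intro hpair hpos
    obtain ⟨k, s⟩ := hd
    rw [List.pairwise_cons] at hpair
    simp only [pvScan, List.filter]
    cases hin : PySem.Str.isIn k hay with
    | false =>
      exact ih hpair.2 (fun p hp => hpos p (List.mem_cons_of_mem _ hp))
    | true =>
      simp only [List.map]
      rw [PySem.List.maxD, PySem.List.max?_id_cons, Option.getD_some]
      -- all remaining scores are ≤ s, so the running max stays s
      have hle : ∀ y ∈ (tl.filter (fun kv => PySem.Str.isIn kv.1 hay)).map (fun kv => kv.2), y ≤ s := by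
        intro y hy
        obtain ⟨p, hp, rfl⟩ := List.mem_map.mp hy
        exact hpair.1 p (List.mem_of_mem_filter hp)
      have h1 := (PySem.List.le_foldl_max ((tl.filter (fun kv => PySem.Str.isIn kv.1 hay)).map (fun kv => kv.2)) s).1
      rcases PySem.List.foldl_max_mem ((tl.filter (fun kv => PySem.Str.isIn kv.1 hay)).map (fun kv => kv.2)) s with h2 | h2
      · exact h2
      · exact le_antisymm (hle _ h2) h1

lemma pvOrdered_sorted : pvOrdered.Pairwise (fun a b => b.2 ≤ a.2) := by decide

lemma pvOrdered_nonneg : ∀ p ∈ pvOrdered, 0 ≤ p.2 := by decide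

-- ===== VERDICT (by name: the statement is the Claim_ definition above) =====
theorem key_page_score_py_spec : Claim_equal_key_page_score_py := by
  intro path label _
  unfold Spec_key_page_score_py key_page_score_py key_page_score_py_alt
  simp only [items_ofList_scores]
  exact maxD_filter_eq_pvScan _ pvOrdered pvOrdered_sorted pvOrdered_nonneg
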